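-- pv_equiv track=rewrite | github.com/Ashenoy64/Trying-out-diff-language | C++/test.py | maximize_profit
-- ===== SOURCE A (Python) =====
-- def maximize_profit(price, profit):
--   n = len(price)
--   increasing = [1] * n
--   profitSum = profit.copy()
--
--   for i in range(1, n):
--         for j in range(i):
--             if price[i] > price[j]:
--                 increasing[i] = max(increasing[i], increasing[j] + 1)
--                 profitSum[i] = max(profitSum[i], profit[i] + profitSum[j])
--
--   return max(profitSum)
-- ===== SOURCE B (Python) =====
-- def maximize_profit(price, profit):
--     # Any single item's profit is a valid answer on its own, so start from
--     # max(profit); then scan a Pareto front of undominated (price, dp) pairs,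
--     # pruning dominated entries on insertion, instead of rescanning the whole
--     # processed prefix for every element.
--     best = max(profit)
--     front = []
--     for p, g in zip(price, profit):
--         m = 0
--         for q, v in front:
--             if q < p and v > m:
--                 m = v
--         d = g + m
--         front = [(q, v) for (q, v) in front if not (p <= q and v <= d)]
--         front.append((p, d))
--         if d > best:
--             best = d
--     return best
-- ===== Notes on version B (the rewrite author's own statement) =====
-- stated objective: faster
-- what changed: Instead of scanning the whole processed prefix for every element (nested loops over all pairs), B starts from max(profit) (any single item is a valid chain) and maintains a pruned Pareto front of undominated (price, dp) pairs with a running maximum; Pre_ excludes empty profit (both programs raise ValueError) and price longer than profit, on which A raises IndexError whenever a dp update reaches an index with no profit entry.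
-- outside the precondition, e.g. on maximize_profit([2, 1], [5]): A returns 5, B returns 5; on maximize_profit([1, 2], [5]): A raises IndexError, B returns 5; on maximize_profit([], []): A raises ValueError, B raises ValueError
import Mathlib
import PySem

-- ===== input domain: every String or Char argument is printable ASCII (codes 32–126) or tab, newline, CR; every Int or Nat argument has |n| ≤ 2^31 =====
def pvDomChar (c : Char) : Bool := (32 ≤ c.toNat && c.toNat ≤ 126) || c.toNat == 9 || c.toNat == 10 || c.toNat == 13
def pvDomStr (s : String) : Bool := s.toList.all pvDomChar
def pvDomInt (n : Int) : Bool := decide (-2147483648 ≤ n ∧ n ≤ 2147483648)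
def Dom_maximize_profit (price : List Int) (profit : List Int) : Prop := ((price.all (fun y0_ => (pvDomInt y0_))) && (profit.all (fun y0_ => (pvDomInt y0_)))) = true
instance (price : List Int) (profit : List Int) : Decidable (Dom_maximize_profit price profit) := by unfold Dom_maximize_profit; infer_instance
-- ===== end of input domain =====

-- B replaces A's scan of the whole processed prefix by a pruned Pareto front of
-- undominated (price, dp) pairs plus a running maximum (objective: faster in practice).

-- ===== PORT A =====
def maximize_profit (price : List Int) (profit : List Int) : Int :=
  let n : Int := price.length
  let increasing : List Int := List.replicate price.length (1 : Int)
  let profitSum : List Int := profit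
  let st :=
    (PySem.List.pyRange 1 n 1).foldl (fun (st : List Int × List Int) i =>
      (PySem.List.pyRange 0 i 1).foldl (fun (st : List Int × List Int) j =>
        if PySem.List.pyGetD price i 0 > PySem.List.pyGetD price j 0 then
          (PySem.List.pySetD st.1 i
             (max (PySem.List.pyGetD st.1 i 0) (PySem.List.pyGetD st.1 j 0 + 1)),
           PySem.List.pySetD st.2 i
             (max (PySem.List.pyGetD st.2 i 0) (PySem.List.pyGetD profit i 0 + PySem.List.pyGetD st.2 j 0)))
        else st) st) (increasing, profitSum)
  (PySem.List.max? st.2 (fun x => x)).getD 0   -- Pre_ guarantees nonemptiness (Python max raises on [])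

-- ===== PORT B =====
def maximize_profit_alt (price : List Int) (profit : List Int) : Int :=
  match PySem.List.max? profit (fun x => x) with
  | none => 0   -- Python's max([]) raises ValueError here; Pre_ excludes empty profit
  | some best =>
    ((price.zip profit).foldl (fun (st : List (Int × Int) × Int) pg =>
      let p := pg.1
      let g := pg.2
      let m := st.1.foldl (fun m qv => if qv.1 < p ∧ m < qv.2 then qv.2 else m) 0
      let d := g + m
      let front := (st.1.filter (fun qv => ¬ (p ≤ qv.1 ∧ qv.2 ≤ d))) ++ [(p, d)]
      (front, if st.2 < d then d else st.2)) ([], best)).2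

-- ===== PRECONDITION & SPEC =====
-- Pre_ excludes empty profit (both programs raise ValueError on max([])) and inputs with
-- fewer profits than prices, on which A raises IndexError whenever a dp update fires at
-- an index with no profit entry; where no update fires there, A returns max(profit), as B does.
def Pre_maximize_profit (price : List Int) (profit : List Int) : Prop :=
  profit ≠ [] ∧ price.length ≤ profit.length
instance (price : List Int) (profit : List Int) : Decidable (Pre_maximize_profit price profit) := by
  unfold Pre_maximize_profit; infer_instance

def pvWitness_maximize_profit : List Int × List Int := ([3, 1, 4, 2], [5, -2, 7, 1])

def Spec_maximize_profit (price : List Int) (profit : List Int) (out : Int) : Prop := out = maximize_profit_alt price profit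
instance (price : List Int) (profit : List Int) (out : Int) : Decidable (Spec_maximize_profit price profit out) := by unfold Spec_maximize_profit; infer_instance

-- ===== CLAIM (what is proved, stated in full; the proofs are below) =====
def Claim_equal_maximize_profit : Prop := ∀ (price : List Int) (profit : List Int), Dom_maximize_profit price profit → Pre_maximize_profit price profit → Spec_maximize_profit price profit (maximize_profit price profit)

-- ===== LEMMAS AND PROOFS =====

def pvQuery (S : List (Int × Int)) (p : Int) : Int :=
  S.foldl (fun m qv => if qv.1 < p ∧ m < qv.2 then qv.2 else m) 0

def pvDps (xs : List (Int × Int)) : List (Int × Int) :=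
  xs.foldl (fun acc pg => acc ++ [(pg.1, pg.2 + pvQuery acc pg.1)]) []

-- generalized query fold
theorem pvQf_ge (p : Int) (L : List (Int × Int)) (init : Int) :
    init ≤ L.foldl (fun m qv => if qv.1 < p ∧ m < qv.2 then qv.2 else m) init := by
  induction L generalizing init with
  | nil => simp
  | cons a t ih =>
    simp only [List.foldl_cons]
    refine le_trans ?_ (ih _)
    split <;> omega

theorem pvQf_mem (p : Int) (L : List (Int × Int)) (init : Int) :
    ∀ qv ∈ L, qv.1 < p → qv.2 ≤ L.foldl (fun m qv => if qv.1 < p ∧ m < qv.2 then qv.2 else m) init := by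
  induction L generalizing init with
  | nil => simp
  | cons a t ih =>
    intro qv hqv hlt
    simp only [List.foldl_cons]
    rcases List.mem_cons.1 hqv with h | h
    · subst h
      refine le_trans ?_ (pvQf_ge p t _)
      split <;> omega
    · exact ih _ qv h hlt

theorem pvQf_reach (p : Int) (L : List (Int × Int)) (init : Int) :
    L.foldl (fun m qv => if qv.1 < p ∧ m < qv.2 then qv.2 else m) init = init ∨
    ∃ qv ∈ L, qv.1 < p ∧ L.foldl (fun m qv => if qv.1 < p ∧ m < qv.2 then qv.2 else m) init = qv.2 := by
  induction L generalizing init with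
  | nil => simp
  | cons a t ih =>
    simp only [List.foldl_cons]
    rcases ih (if a.1 < p ∧ init < a.2 then a.2 else init) with h | h
    · by_cases hc : a.1 < p ∧ init < a.2
      · right; exact ⟨a, List.mem_cons_self, hc.1, by simp [hc] at h ⊢; omega⟩
      · left; simpa [hc] using h
    · right
      obtain ⟨qv, hm, h1, h2⟩ := h
      exact ⟨qv, List.mem_cons_of_mem _ hm, h1, h2⟩

theorem pvQuery_eq_of_dom (front full : List (Int × Int))
    (hsub : ∀ t ∈ front, t ∈ full)
    (hdom : ∀ s ∈ full, ∃ t ∈ front, t.1 ≤ s.1 ∧ s.2 ≤ t.2) (p : Int) :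
    pvQuery front p = pvQuery full p := by
  unfold pvQuery
  apply le_antisymm
  · rcases pvQf_reach p front 0 with h | ⟨qv, hm, h1, h2⟩
    · rw [h]; exact pvQf_ge p full 0
    · rw [h2]; exact pvQf_mem p full 0 qv (hsub qv hm) h1
  · rcases pvQf_reach p full 0 with h | ⟨qv, hm, h1, h2⟩
    · rw [h]; exact pvQf_ge p front 0
    · rw [h2]
      obtain ⟨t, htm, ht1, ht2⟩ := hdom qv hm
      exact le_trans ht2 (pvQf_mem p front 0 t htm (lt_of_le_of_lt ht1 h1))

theorem pvDps_append (T : List (Int × Int)) (x : Int × Int) :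
    pvDps (T ++ [x]) = pvDps T ++ [(x.1, x.2 + pvQuery (pvDps T) x.1)] := by
  simp [pvDps, List.foldl_append]

theorem pvDps_fst (T : List (Int × Int)) :
    (pvDps T).map Prod.fst = T.map Prod.fst := by
  induction T using List.reverseRecOn with
  | nil => simp [pvDps]
  | append_singleton t x ih => simp [pvDps_append, ih]

theorem pvDps_length (T : List (Int × Int)) : (pvDps T).length = T.length := by
  have := congrArg List.length (pvDps_fst T)
  simpa using this

def pvBStep (st : List (Int × Int) × Int) (pg : Int × Int) :
    List (Int × Int) × Int :=
  let p := pg.1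
  let g := pg.2
  let m := st.1.foldl (fun m qv => if qv.1 < p ∧ m < qv.2 then qv.2 else m) 0
  let d := g + m
  let front := (st.1.filter (fun qv => ¬ (p ≤ qv.1 ∧ qv.2 ≤ d))) ++ [(p, d)]
  (front, if st.2 < d then d else st.2)

def pvInv (S front : List (Int × Int)) (best b0 : Int) : Prop :=
  (∀ t ∈ front, t ∈ pvDps S) ∧
  (∀ s ∈ pvDps S, ∃ t ∈ front, t.1 ≤ s.1 ∧ s.2 ≤ t.2) ∧
  best = ((pvDps S).map Prod.snd).foldl max b0

theorem pvBStep_inv (S front : List (Int × Int)) (best b0 : Int) (x : Int × Int)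
    (h : pvInv S front best b0) :
    pvInv (S ++ [x]) (pvBStep (front, best) x).1 (pvBStep (front, best) x).2 b0 := by
  obtain ⟨hsub, hdom, hbest⟩ := h
  have hq : pvQuery front x.1 = pvQuery (pvDps S) x.1 :=
    pvQuery_eq_of_dom front (pvDps S) hsub hdom x.1
  have hq' : front.foldl (fun m qv => if qv.1 < x.1 ∧ m < qv.2 then qv.2 else m) 0
      = pvQuery (pvDps S) x.1 := hq
  have hdps : pvDps (S ++ [x]) = pvDps S ++ [(x.1, x.2 + pvQuery (pvDps S) x.1)] :=
    pvDps_append S x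
  refine ⟨?_, ?_, ?_⟩
  · intro t ht
    simp only [pvBStep, List.mem_append, List.mem_filter, List.mem_singleton] at ht
    rcases ht with ⟨htm, _⟩ | ht
    · rw [hdps]; exact List.mem_append_left _ (hsub t htm)
    · rw [hdps, ht]
      simp [hq']
  · intro s hs
    rw [hdps] at hs
    rcases List.mem_append.1 hs with hs | hs
    · obtain ⟨t, htm, ht1, ht2⟩ := hdom s hs
      by_cases hf : x.1 ≤ t.1 ∧ t.2 ≤ x.2 + pvQuery front x.1
      · refine ⟨(x.1, x.2 + pvQuery front x.1), ?_, le_trans hf.1 ht1, le_trans ht2 hf.2⟩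
        simp [pvBStep, pvQuery]
      · refine ⟨t, ?_, ht1, ht2⟩
        have h2 : t.1 < x.1 ∨ x.2 + pvQuery front x.1 < t.2 := by
          by_contra hc
          rcases not_or.1 hc with ⟨hc1, hc2⟩
          exact hf ⟨le_of_not_gt hc1, le_of_not_gt hc2⟩
        simp only [pvBStep, List.mem_append, List.mem_filter]
        left
        refine ⟨htm, ?_⟩
        simpa [pvQuery] using h2
    · simp only [List.mem_singleton] at hs
      refine ⟨(x.1, x.2 + pvQuery front x.1), ?_, ?_, ?_⟩
      · simp [pvBStep, pvQuery]
      · simp [hs]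
      · simp [hs, hq]
  · simp only [pvBStep, hbest, hdps, List.map_append, List.map_cons, List.map_nil, hq']
    rw [List.foldl_append]
    simp only [List.foldl_cons, List.foldl_nil]
    have hmx : ∀ a b : Int, (if a < b then b else a) = max a b := by intro a b; split <;> omega
    rw [hmx]

theorem pvB_loop (rest : List (Int × Int)) :
    ∀ (S front : List (Int × Int)) (best b0 : Int), pvInv S front best b0 →
      pvInv (S ++ rest) (rest.foldl pvBStep (front, best)).1 (rest.foldl pvBStep (front, best)).2 b0 := by
  induction rest with
  | nil => intro S front best b0 h; simpa using h
  | cons x rest ih =>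
    intro S front best b0 h
    have h1 := pvBStep_inv S front best b0 x h
    have h2 := ih (S ++ [x]) (pvBStep (front, best) x).1 (pvBStep (front, best) x).2 b0 h1
    simpa using h2

-- A-port inner/outer step extracted (profitSum component only)
def pvAInner (price profit : List Int) (i : Int) (ps : List Int) (j : Int) : List Int :=
  if PySem.List.pyGetD price i 0 > PySem.List.pyGetD price j 0 then
    PySem.List.pySetD ps i
      (max (PySem.List.pyGetD ps i 0) (PySem.List.pyGetD profit i 0 + PySem.List.pyGetD ps j 0))
  else ps

def pvAStep (price profit : List Int) (ps : List Int) (i : Int) : List Int :=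
  (PySem.List.pyRange 0 i 1).foldl (pvAInner price profit i) ps

-- the pair-state fold of port A projects to the profitSum fold
theorem pvA_proj (price profit : List Int) :
    ((PySem.List.pyRange 1 (price.length : Int) 1).foldl (fun (st : List Int × List Int) i =>
      (PySem.List.pyRange 0 i 1).foldl (fun (st : List Int × List Int) j =>
        if PySem.List.pyGetD price i 0 > PySem.List.pyGetD price j 0 then
          (PySem.List.pySetD st.1 i
             (max (PySem.List.pyGetD st.1 i 0) (PySem.List.pyGetD st.1 j 0 + 1)),
           PySem.List.pySetD st.2 i
             (max (PySem.List.pyGetD st.2 i 0) (PySem.List.pyGetD profit i 0 + PySem.List.pyGetD st.2 j 0)))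
        else st) st) (List.replicate price.length (1 : Int), profit)).2
    = (PySem.List.pyRange 1 (price.length : Int) 1).foldl (pvAStep price profit) profit := by
  have hfun : ∀ i : Int,
      (fun (st : List Int × List Int) j =>
        if PySem.List.pyGetD price i 0 > PySem.List.pyGetD price j 0 then
          (PySem.List.pySetD st.1 i
             (max (PySem.List.pyGetD st.1 i 0) (PySem.List.pyGetD st.1 j 0 + 1)),
           PySem.List.pySetD st.2 i
             (max (PySem.List.pyGetD st.2 i 0) (PySem.List.pyGetD profit i 0 + PySem.List.pyGetD st.2 j 0)))
        else st)
      = (fun (st : List Int × List Int) j =>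
        ((if PySem.List.pyGetD price i 0 > PySem.List.pyGetD price j 0 then
            PySem.List.pySetD st.1 i
              (max (PySem.List.pyGetD st.1 i 0) (PySem.List.pyGetD st.1 j 0 + 1)) else st.1),
         pvAInner price profit i st.2 j)) := by
    intro i
    funext st j
    unfold pvAInner
    split <;> simp
  have hfun2 :
      (fun (st : List Int × List Int) i =>
        (PySem.List.pyRange 0 i 1).foldl (fun (st : List Int × List Int) j =>
          if PySem.List.pyGetD price i 0 > PySem.List.pyGetD price j 0 then
            (PySem.List.pySetD st.1 i
               (max (PySem.List.pyGetD st.1 i 0) (PySem.List.pyGetD st.1 j 0 + 1)),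
             PySem.List.pySetD st.2 i
               (max (PySem.List.pyGetD st.2 i 0) (PySem.List.pyGetD profit i 0 + PySem.List.pyGetD st.2 j 0)))
          else st) st)
      = (fun (st : List Int × List Int) i =>
        ((PySem.List.pyRange 0 i 1).foldl (fun a j =>
            if PySem.List.pyGetD price i 0 > PySem.List.pyGetD price j 0 then
              PySem.List.pySetD a i
                (max (PySem.List.pyGetD a i 0) (PySem.List.pyGetD a j 0 + 1)) else a) st.1,
         pvAStep price profit st.2 i)) := by
    funext st i
    rw [hfun i]
    rw [PySem.List.foldl_prod_mk
      (f := fun a j => if PySem.List.pyGetD price i 0 > PySem.List.pyGetD price j 0 then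
              PySem.List.pySetD a i
                (max (PySem.List.pyGetD a i 0) (PySem.List.pyGetD a j 0 + 1)) else a)
      (g := fun a j => pvAInner price profit i a j)]
    · rfl
  rw [hfun2]
  rw [PySem.List.foldl_prod_mk
    (f := fun a i => (PySem.List.pyRange 0 i 1).foldl (fun a j =>
            if PySem.List.pyGetD price i 0 > PySem.List.pyGetD price j 0 then
              PySem.List.pySetD a i
                (max (PySem.List.pyGetD a i 0) (PySem.List.pyGetD a j 0 + 1)) else a) a)
    (g := fun a i => pvAStep price profit a i)]

theorem pvGetD_append_mid {α : Type} [Inhabited α] (A : List α) (c : α) (R : List α) (d : α) :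
    (A ++ c :: R).getD A.length d = c := by
  induction A with
  | nil => rfl
  | cons a t ih => simp

theorem pvSet_append_mid {α : Type} (A : List α) (c v : α) (R : List α) :
    (A ++ c :: R).set A.length v = A ++ v :: R := by
  induction A with
  | nil => rfl
  | cons a t ih => simp

theorem pvQuery_append (X : List (Int × Int)) (y : Int × Int) (p : Int) :
    pvQuery (X ++ [y]) p = if y.1 < p ∧ pvQuery X p < y.2 then y.2 else pvQuery X p := by
  simp [pvQuery, List.foldl_append]

-- inner loop of A evaluated on the dp-prefix state
theorem pvAInner_partial (price profit : List Int) (hle : price.length ≤ profit.length)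
    (i : Nat) (hin : i < price.length) :
    ∀ m : Nat, m ≤ i →
      (PySem.List.pyRange 0 (m : Int) 1).foldl (pvAInner price profit (i : Int))
          ((pvDps ((price.zip profit).take i)).map Prod.snd ++ profit.drop i)
        = (pvDps ((price.zip profit).take i)).map Prod.snd ++
            (profit.getD i 0 +
              pvQuery ((pvDps ((price.zip profit).take i)).take m) (price.getD i 0)) ::
            profit.drop (i + 1) := by
  have hzlen : (price.zip profit).length = price.length := by
    simp [List.length_zip]; omega
  have hTlen : ((price.zip profit).take i).length = i := by
    simp [List.length_take, hzlen]; omega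
  have hD : (pvDps ((price.zip profit).take i)).length = i := by
    rw [pvDps_length, hTlen]
  have hdropi : profit.drop i = profit.getD i 0 :: profit.drop (i + 1) := by
    rw [List.getD_eq_getElem _ _ (by omega)]
    exact List.drop_eq_getElem_cons (by omega)
  intro m
  induction m with
  | zero =>
    intro _
    simp only [Nat.cast_zero, PySem.List.pyRange_zero, List.take_zero]
    rw [hdropi]
    simp [pvQuery]
  | succ m ih =>
    intro hm
    have hmi : m < i := by omega
    have hrange : PySem.List.pyRange 0 ((m + 1 : Nat) : Int) 1
        = PySem.List.pyRange 0 (m : Int) 1 ++ [(m : Int)] := by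
      push_cast
      exact PySem.List.pyRange_one_succ_right (by positivity)
    rw [hrange, List.foldl_append, ih (by omega)]
    set D := pvDps ((price.zip profit).take i) with hDdef
    set g := profit.getD i 0 with hgdef
    set p := price.getD i 0 with hpdef
    simp only [List.foldl_cons, List.foldl_nil]
    unfold pvAInner
    have hpgetI : PySem.List.pyGetD price (i : Int) 0 = p := by
      simp [PySem.List.pyGetD_natCast, hpdef]
    have hpgetM : PySem.List.pyGetD price (m : Int) 0 = price.getD m 0 := by
      simp [PySem.List.pyGetD_natCast]
    have hstateI : PySem.List.pyGetD (D.map Prod.snd ++ (g + pvQuery (D.take m) p) :: profit.drop (i + 1)) (i : Int) 0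
        = g + pvQuery (D.take m) p := by
      rw [PySem.List.pyGetD_natCast]
      have : i = (D.map Prod.snd).length := by simp [hD]
      rw [this]
      exact pvGetD_append_mid _ _ _ _
    have hgetProfitI : PySem.List.pyGetD profit (i : Int) 0 = g := by
      simp [PySem.List.pyGetD_natCast, hgdef]
    have hm2 : m < ((price.zip profit).take i).length := by omega
    have hTm : ((price.zip profit).take i)[m] = (price[m]'(by omega), profit[m]'(by omega)) := by
      simp [List.getElem_take, List.getElem_zip]
    have hDm : D[m]'(by omega) = (price.getD m 0, (D.map Prod.snd).getD m 0) := by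
      have hfst : (D[m]'(by omega)).1 = price.getD m 0 := by
        have h := congrArg (fun l => l.getD m 0) (pvDps_fst ((price.zip profit).take i))
        simp only [← hDdef] at h
        rw [List.getD_eq_getElem _ _ (by simp [hD]; omega), List.getElem_map] at h
        rw [List.getD_eq_getElem _ _ (by simpa using hm2), List.getElem_map, hTm] at h
        rw [h, List.getD_eq_getElem _ _ (by omega)]
      have hsnd : (D[m]'(by omega)).2 = (D.map Prod.snd).getD m 0 := by
        rw [List.getD_eq_getElem _ _ (by simp [hD]; omega), List.getElem_map]
      rw [← hfst, ← hsnd]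
    have hstateM : PySem.List.pyGetD (D.map Prod.snd ++ (g + pvQuery (D.take m) p) :: profit.drop (i + 1)) (m : Int) 0
        = (D.map Prod.snd).getD m 0 := by
      rw [PySem.List.pyGetD_natCast]
      exact List.getD_append _ _ _ _ (by rw [List.length_map, hD]; omega)
    have htake : D.take (m + 1) = D.take m ++ [D[m]'(by omega)] := by
      rw [List.take_add_one]
      simp [List.getElem?_eq_getElem (by omega : m < D.length)]
    rw [htake, pvQuery_append, hpgetI, hpgetM, hstateI, hstateM, hgetProfitI, hDm]
    by_cases hcond : price.getD m 0 < p
    · rw [if_pos hcond]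
      simp only [PySem.List.pySetD_natCast]
      have : i = (D.map Prod.snd).length := by simp [hD]
      rw [this, pvSet_append_mid]
      congr 2
      by_cases h2 : pvQuery (D.take m) p < (D.map Prod.snd).getD m 0
      · rw [if_pos ⟨hcond, h2⟩]; omega
      · rw [if_neg (by intro hc; exact h2 hc.2)]; omega
    · rw [if_neg (by omega)]
      rw [if_neg (by intro hc; exact hcond hc.1)]

theorem pvAOuter (price profit : List Int) (hle : price.length ≤ profit.length) :
    ∀ k : Nat, 1 ≤ k → k ≤ price.length →
      (PySem.List.pyRange 1 (k : Int) 1).foldl (pvAStep price profit) profit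
        = (pvDps ((price.zip profit).take k)).map Prod.snd ++ profit.drop k := by
  have hzlen : (price.zip profit).length = price.length := by
    simp [List.length_zip]; omega
  intro k hk1
  induction k, hk1 using Nat.le_induction with
  | base =>
    intro hk2
    have h0 : 0 < price.length := by omega
    have h0p : 0 < profit.length := by omega
    have h0z : 0 < (price.zip profit).length := by omega
    rw [show ((1 : Nat) : Int) = 1 by norm_num,
        PySem.List.pyRange_one_eq_nil (le_refl 1), List.foldl_nil]
    have htake1 : (price.zip profit).take 1 = [(price.zip profit)[0]] := by
      rw [show (1 : Nat) = 0 + 1 from rfl, List.take_add_one]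
      simp [List.getElem?_eq_getElem h0z]
    have hz0 : (price.zip profit)[0] = (price[0], profit[0]) := List.getElem_zip
    rw [htake1, hz0]
    have hdps1 : pvDps [(price[0]'h0, profit[0]'h0p)] = [(price[0]'h0, profit[0]'h0p)] := by
      simp [pvDps, pvQuery]
    rw [hdps1]
    have hdrop : profit.drop 0 = profit[0] :: profit.drop 1 := List.drop_eq_getElem_cons h0p
    simp only [List.map_cons, List.map_nil]
    rw [List.singleton_append, ← hdrop, List.drop_zero]
  | succ k hk ih =>
    intro hk2
    have hkz : k < (price.zip profit).length := by omega
    have hrange : PySem.List.pyRange 1 ((k + 1 : Nat) : Int) 1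
        = PySem.List.pyRange 1 (k : Int) 1 ++ [(k : Int)] := by
      push_cast
      exact PySem.List.pyRange_one_succ_right (by exact_mod_cast hk)
    rw [hrange, List.foldl_append, ih (by omega), List.foldl_cons, List.foldl_nil]
    unfold pvAStep
    rw [pvAInner_partial price profit hle k (by omega) k (le_refl k)]
    have hD : (pvDps ((price.zip profit).take k)).length = k := by
      rw [pvDps_length]
      simp [List.length_take]; omega
    have htakeD : (pvDps ((price.zip profit).take k)).take k = pvDps ((price.zip profit).take k) :=
      List.take_of_length_le (le_of_eq hD)
    have htakek : (price.zip profit).take (k + 1)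
        = (price.zip profit).take k ++ [(price[k], profit[k])] := by
      rw [List.take_add_one]
      simp only [List.getElem?_eq_getElem hkz, Option.toList_some]
      rw [List.getElem_zip]
      rfl
    rw [htakeD, htakek, pvDps_append]
    simp only [List.map_append, List.map_cons, List.map_nil]
    rw [List.append_assoc, List.singleton_append]
    rw [List.getD_eq_getElem _ _ (show k < profit.length by omega),
      List.getD_eq_getElem _ _ (show k < price.length by omega)]
    rfl

theorem pvInv_base (b0 : Int) : pvInv [] [] b0 b0 := by
  refine ⟨?_, ?_, ?_⟩ <;> simp [pvDps]

theorem pvA_final (price profit : List Int) (hle : price.length ≤ profit.length)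
    (hne : price ≠ []) :
    maximize_profit price profit
      = (PySem.List.max? ((pvDps (price.zip profit)).map Prod.snd ++ profit.drop price.length)
          (fun x => x)).getD 0 := by
  have hzlen : (price.zip profit).length = price.length := by
    simp [List.length_zip]; omega
  have h1 : 1 ≤ price.length := by
    cases price with
    | nil => exact absurd rfl hne
    | cons a t => simp
  have hunfold : maximize_profit price profit
      = (PySem.List.max? (((PySem.List.pyRange 1 (price.length : Int) 1).foldl (fun (st : List Int × List Int) i =>
          (PySem.List.pyRange 0 i 1).foldl (fun (st : List Int × List Int) j =>
            if PySem.List.pyGetD price i 0 > PySem.List.pyGetD price j 0 then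
              (PySem.List.pySetD st.1 i
                 (max (PySem.List.pyGetD st.1 i 0) (PySem.List.pyGetD st.1 j 0 + 1)),
               PySem.List.pySetD st.2 i
                 (max (PySem.List.pyGetD st.2 i 0) (PySem.List.pyGetD profit i 0 + PySem.List.pyGetD st.2 j 0)))
            else st) st) (List.replicate price.length (1 : Int), profit)).2) (fun x => x)).getD 0 := rfl
  rw [hunfold, pvA_proj]
  rw [pvAOuter price profit hle price.length h1 (le_refl _)]
  rw [show (price.zip profit).take price.length = price.zip profit from by
        rw [← hzlen]; exact List.take_length]

theorem pvB_final (price profit : List Int) (b0 : Int)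
    (h : PySem.List.max? profit (fun x => x) = some b0) :
    maximize_profit_alt price profit
      = ((pvDps (price.zip profit)).map Prod.snd).foldl max b0 := by
  have h0 : maximize_profit_alt price profit
      = (match PySem.List.max? profit (fun x => x) with
         | none => (0 : Int)
         | some best => ((price.zip profit).foldl pvBStep ([], best)).2) := rfl
  rw [h0, h]
  have hinv := pvB_loop (price.zip profit) [] [] b0 b0 (pvInv_base b0)
  rw [List.nil_append] at hinv
  exact hinv.2.2

-- foldl-max toolkit
theorem pvFM_ge_init (L : List Int) (a : Int) : a ≤ L.foldl max a := by
  induction L generalizing a with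
  | nil => simp
  | cons x t ih => exact le_trans (le_max_left a x) (ih (max a x))

theorem pvFM_ge_mem (L : List Int) (a : Int) : ∀ x ∈ L, x ≤ L.foldl max a := by
  induction L generalizing a with
  | nil => simp
  | cons y t ih =>
    intro x hx
    rcases List.mem_cons.1 hx with h | h
    · subst h; exact le_trans (le_max_right a x) (pvFM_ge_init t _)
    · exact ih _ x h

theorem pvFM_cases (L : List Int) (a : Int) : L.foldl max a = a ∨ L.foldl max a ∈ L := by
  induction L generalizing a with
  | nil => left; rfl
  | cons x t ih =>
    simp only [List.foldl_cons]
    rcases ih (max a x) with h | h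
    · rcases max_choice a x with hm | hm
      · left; rw [h, hm]
      · right; rw [h, hm]; exact List.mem_cons_self
    · right; exact List.mem_cons_of_mem _ h

-- every source pair's profit is dominated by some dp entry
theorem pvDps_dominates (xs : List (Int × Int)) :
    ∀ pg ∈ xs, ∃ y ∈ pvDps xs, pg.2 ≤ y.2 := by
  induction xs using List.reverseRecOn with
  | nil => simp
  | append_singleton t x ih =>
    intro pg hpg
    rcases List.mem_append.1 hpg with h | h
    · obtain ⟨y, hy, hle⟩ := ih pg h
      exact ⟨y, by rw [pvDps_append]; exact List.mem_append_left _ hy, hle⟩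
    · simp only [List.mem_singleton] at h
      subst h
      refine ⟨(pg.1, pg.2 + pvQuery (pvDps t) pg.1), ?_, ?_⟩
      · rw [pvDps_append]; simp
      · have h0 : (0 : Int) ≤ pvQuery (pvDps t) pg.1 := pvQf_ge pg.1 _ 0
        simp; omega

theorem pvZip_map_snd (price profit : List Int) (hle : price.length ≤ profit.length) :
    (price.zip profit).map Prod.snd = profit.take price.length := by
  induction price generalizing profit with
  | nil => simp
  | cons p pt ih =>
    cases profit with
    | nil => simp at hle
    | cons g gt =>
      simp only [List.zip_cons_cons, List.map_cons, List.length_cons, List.take_succ_cons]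
      rw [ih gt (by simpa using hle)]

theorem pv_main (price profit : List Int) (hpne : profit ≠ [])
    (hle : price.length ≤ profit.length) :
    maximize_profit price profit = maximize_profit_alt price profit := by
  obtain ⟨g0, gt, hP⟩ : ∃ g0 gt, profit = g0 :: gt := by
    cases profit with
    | nil => exact absurd rfl hpne
    | cons a t => exact ⟨a, t, rfl⟩
  have hmax : PySem.List.max? profit (fun x => x) = some (gt.foldl max g0) := by
    rw [hP, PySem.List.max?_id_cons]
  set b0 := gt.foldl max g0 with hb0
  have hb0mem : b0 ∈ profit := by
    rw [hP]
    rcases pvFM_cases gt g0 with h | h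
    · rw [hb0, h]; exact List.mem_cons_self
    · exact List.mem_cons_of_mem _ h
  have hb0top : ∀ x ∈ profit, x ≤ b0 := by
    intro x hx
    rw [hP] at hx
    rcases List.mem_cons.1 hx with h | h
    · subst h; exact pvFM_ge_init gt x
    · exact pvFM_ge_mem gt g0 x h
  rw [pvB_final price profit b0 hmax]
  set Dm := (pvDps (price.zip profit)).map Prod.snd with hDm
  set R := profit.drop price.length with hR
  -- characterize A as the Python max over Dm ++ R
  have hA : maximize_profit price profit = (PySem.List.max? (Dm ++ R) (fun x => x)).getD 0 := by
    rcases eq_or_ne price [] with hnil | hne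
    · subst hnil
      have hD0 : Dm = [] := by simp [hDm, pvDps]
      have hR0 : R = profit := by simp [hR]
      rw [hD0, List.nil_append, hR0]
      rfl
    · exact pvA_final price profit hle hne
  rw [hA]
  obtain ⟨y, u, hL⟩ : ∃ y u, Dm ++ R = y :: u := by
    cases hcase : Dm ++ R with
    | nil =>
      exfalso
      have hlen0 : profit.length = 0 := by
        have h1 := congrArg List.length hcase
        simp only [hDm, hR, List.length_append, List.length_map, pvDps_length,
          List.length_zip, List.length_drop, List.length_nil] at h1
        omega
      exact hpne (List.eq_nil_of_length_eq_zero hlen0)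
    | cons y u => exact ⟨y, u, rfl⟩
  rw [hL, PySem.List.max?_id_cons, Option.getD_some]
  have hAtop : ∀ x ∈ Dm ++ R, x ≤ u.foldl max y := by
    intro x hx
    rw [hL] at hx
    rcases List.mem_cons.1 hx with h | h
    · subst h; exact pvFM_ge_init u x
    · exact pvFM_ge_mem u y x h
  have hAmem : u.foldl max y ∈ Dm ++ R := by
    rw [hL]
    rcases pvFM_cases u y with h | h
    · rw [h]; exact List.mem_cons_self
    · exact List.mem_cons_of_mem _ h
  have hBtop : ∀ x ∈ Dm, x ≤ Dm.foldl max b0 := pvFM_ge_mem Dm b0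
  have hProfTop : ∀ x ∈ profit, x ≤ u.foldl max y := by
    intro x hx
    have hsplit : x ∈ profit.take price.length ∨ x ∈ R := by
      rw [hR, ← List.mem_append, List.take_append_drop]
      exact hx
    rcases hsplit with h | h
    · rw [← pvZip_map_snd price profit hle] at h
      obtain ⟨pg, hpg, hpg2⟩ := List.mem_map.1 h
      obtain ⟨yd, hyd, hled⟩ := pvDps_dominates (price.zip profit) pg hpg
      have hmemD : yd.2 ∈ Dm := by rw [hDm]; exact List.mem_map_of_mem hyd
      calc x = pg.2 := hpg2.symm
        _ ≤ yd.2 := hled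
        _ ≤ u.foldl max y := hAtop _ (List.mem_append_left _ hmemD)
    · exact hAtop x (List.mem_append_right _ h)
  apply le_antisymm
  · rcases List.mem_append.1 hAmem with h | h
    · exact hBtop _ h
    · exact le_trans (hb0top _ (List.mem_of_mem_drop h)) (pvFM_ge_init Dm b0)
  · rcases pvFM_cases Dm b0 with h | h
    · rw [h]; exact hProfTop b0 hb0mem
    · exact hAtop _ (List.mem_append_left _ h)

theorem maximize_profit_witness_ok :
    Dom_maximize_profit pvWitness_maximize_profit.1 pvWitness_maximize_profit.2 ∧
    Pre_maximize_profit pvWitness_maximize_profit.1 pvWitness_maximize_profit.2 := by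
  constructor <;> decide

-- ===== VERDICT (by name: the statement is the Claim_ definition above) =====
theorem maximize_profit_spec : Claim_equal_maximize_profit := by
  intro price profit _ hpre
  unfold Spec_maximize_profit
  exact pv_main price profit hpre.1 hpre.2
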